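-- pv_equiv track=rewrite | github.com/georgegarforthpersonal/heal_data | app/dashboards/unified_dashboard.py | filter_sightings
-- ===== SOURCE A (Python) =====
-- from typing import List, Literal
--
-- def filter_sightings(sightings: List[dict], conservation_statuses=None, date_range=None, locations=None):
--     """Filter sightings based on selected criteria."""
--     filtered = sightings
--
--     if conservation_statuses and len(conservation_statuses) < 3:  # Only filter if not all are selected
--         filtered = [s for s in filtered if s['conservation_status'] in conservation_statuses]
--
--     if date_range and len(date_range) == 2:
--         start_date, end_date = date_range
--         filtered = [s for s in filtered if start_date <= s['date'] <= end_date]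
--
--     if locations:
--         filtered = [s for s in filtered if s['transect_name'] in locations]
--
--     return filtered
-- ===== SOURCE B (Python) =====
-- def filter_sightings(sightings, conservation_statuses=None, date_range=None, locations=None):
--     """Filter sightings: evaluate the guards once into flags, then one explicit loop
--     with continue-style skips (returns the input list itself when no filter is active)."""
--     by_status = bool(conservation_statuses) and len(conservation_statuses) < 3
--     by_date = bool(date_range) and len(date_range) == 2
--     by_loc = bool(locations)
--     if not (by_status or by_date or by_loc):
--         return sightings
--     result = []
--     for s in sightings:
--         if by_status and s['conservation_status'] not in conservation_statuses:
--             continue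
--         if by_date and not (date_range[0] <= s['date'] <= date_range[1]):
--             continue
--         if by_loc and s['transect_name'] not in locations:
--             continue
--         result.append(s)
--     return result
-- ===== Notes on version B (the rewrite author's own statement) =====
-- stated objective: alternative
-- what changed: A rebuilds the list with up to three successive list-comprehension passes; B evaluates the three guards once into flags and does a single explicit loop with continue-style skips and an accumulator, returning the input list unchanged when no filter is active.
import Mathlib
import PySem

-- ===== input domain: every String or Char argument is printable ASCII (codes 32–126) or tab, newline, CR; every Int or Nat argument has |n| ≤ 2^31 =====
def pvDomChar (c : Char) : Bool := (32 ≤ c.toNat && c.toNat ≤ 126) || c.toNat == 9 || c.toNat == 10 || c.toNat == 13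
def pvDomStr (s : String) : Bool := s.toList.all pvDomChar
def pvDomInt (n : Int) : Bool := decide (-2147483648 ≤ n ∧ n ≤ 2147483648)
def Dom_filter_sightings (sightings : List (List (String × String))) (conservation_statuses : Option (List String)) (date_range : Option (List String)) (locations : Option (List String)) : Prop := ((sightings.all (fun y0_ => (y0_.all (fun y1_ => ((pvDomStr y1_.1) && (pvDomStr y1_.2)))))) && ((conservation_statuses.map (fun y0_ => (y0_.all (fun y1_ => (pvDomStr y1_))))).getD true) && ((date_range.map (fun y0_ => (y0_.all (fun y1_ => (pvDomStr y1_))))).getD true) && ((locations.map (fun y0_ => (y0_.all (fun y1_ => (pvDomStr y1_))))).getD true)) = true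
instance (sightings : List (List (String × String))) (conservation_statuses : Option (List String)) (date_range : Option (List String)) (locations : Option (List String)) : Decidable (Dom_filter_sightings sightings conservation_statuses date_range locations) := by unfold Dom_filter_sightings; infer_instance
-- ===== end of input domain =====

-- B replaces A's up-to-three successive filtering passes by one explicit accumulator loop with
-- continue-style skips, after evaluating the guards once into flags (objective: alternative
-- decomposition; return value only, no mutation).

-- shared helpers: Python string lexicographic ≤ and dict lookup (first match in the assoc list)
def pvLexLe : List Char → List Char → Bool
  | [], _ => true
  | _ :: _, [] => false
  | a :: as, b :: bs =>
      if a.toNat < b.toNat then true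
      else if a.toNat == b.toNat then pvLexLe as bs else false

def pvStrLe (a b : String) : Bool := pvLexLe a.toList b.toList

-- s['k'] with default "" — exact on inputs admitted by Pre_ (key present wherever Python looks it up)
def pvLookupD (s : List (String × String)) (k : String) : String :=
  ((s.find? (fun p => p.1 == k)).map (·.2)).getD ""

def pvHasKey (s : List (String × String)) (k : String) : Bool :=
  (s.find? (fun p => p.1 == k)).isSome

-- ===== PORT A =====
def filter_sightings (sightings : List (List (String × String))) (conservation_statuses : Option (List String)) (date_range : Option (List String)) (locations : Option (List String)) : List (List (String × String)) :=
  let filtered := sightings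
  let filtered :=
    match conservation_statuses with
    | some l =>
        if !l.isEmpty && l.length < 3 then
          filtered.filter (fun s => l.contains (pvLookupD s "conservation_status"))
        else filtered
    | none => filtered
  let filtered :=
    match date_range with
    | some l =>
        if !l.isEmpty && l.length == 2 then
          let start_date := l.getD 0 ""
          let end_date := l.getD 1 ""
          filtered.filter (fun s =>
            pvStrLe start_date (pvLookupD s "date") && pvStrLe (pvLookupD s "date") end_date)
        else filtered
    | none => filtered
  let filtered :=
    match locations with
    | some l =>
        if !l.isEmpty then
          filtered.filter (fun s => l.contains (pvLookupD s "transect_name"))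
        else filtered
    | none => filtered
  filtered

-- ===== PORT B =====
-- the 'for s in sightings' loop of Source B: accumulator + continue-style skips, result reversed at the end
def pvLoopB (cs dr locs : List String) (by_status by_date by_loc : Bool)
    (acc : List (List (String × String))) :
    List (List (String × String)) → List (List (String × String))
  | [] => acc.reverse
  | s :: rest =>
      if by_status && !(cs.contains (pvLookupD s "conservation_status")) then
        pvLoopB cs dr locs by_status by_date by_loc acc rest
      else if by_date && !(pvStrLe (dr.getD 0 "") (pvLookupD s "date") &&
                           pvStrLe (pvLookupD s "date") (dr.getD 1 "")) then
        pvLoopB cs dr locs by_status by_date by_loc acc rest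
      else if by_loc && !(locs.contains (pvLookupD s "transect_name")) then
        pvLoopB cs dr locs by_status by_date by_loc acc rest
      else
        pvLoopB cs dr locs by_status by_date by_loc (s :: acc) rest

def filter_sightings_alt (sightings : List (List (String × String))) (conservation_statuses : Option (List String)) (date_range : Option (List String)) (locations : Option (List String)) : List (List (String × String)) :=
  let by_status := match conservation_statuses with
    | some l => !l.isEmpty && l.length < 3
    | none => false
  let by_date := match date_range with
    | some l => !l.isEmpty && l.length == 2
    | none => false
  let by_loc := match locations with
    | some l => !l.isEmpty
    | none => false
  if !(by_status || by_date || by_loc) then sightings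
  else
    pvLoopB (conservation_statuses.getD []) (date_range.getD []) (locations.getD [])
      by_status by_date by_loc [] sightings

-- ===== PRECONDITION & SPEC =====
-- activity of each filter (the same guards both Pythons evaluate)
def pvStatusActive (cs : Option (List String)) : Bool :=
  match cs with | some l => !l.isEmpty && l.length < 3 | none => false
def pvDateActive (dr : Option (List String)) : Bool :=
  match dr with | some l => !l.isEmpty && l.length == 2 | none => false
def pvLocActive (locs : Option (List String)) : Bool :=
  match locs with | some l => !l.isEmpty | none => false

-- Python string <= (lexicographic by code point), via Mathlib's List.Lex — used only by Pre_
def pvStrLeB (a b : String) : Bool := !decide (List.Lex (· < ·) b.toList a.toList)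

-- per-sighting: every key Python actually looks up is present (later lookups happen only if the
-- sighting survives the earlier active filters)
def pvPreL (s : List (String × String)) (locs : Option (List String)) : Bool :=
  if pvLocActive locs then pvHasKey s "transect_name" else true
def pvPreD (s : List (String × String)) (dr locs : Option (List String)) : Bool :=
  if pvDateActive dr then
    pvHasKey s "date" &&
      (if pvStrLeB ((dr.getD []).getD 0 "") (pvLookupD s "date") &&
          pvStrLeB (pvLookupD s "date") ((dr.getD []).getD 1 "") then pvPreL s locs else true)
  else pvPreL s locs
def pvPreS (s : List (String × String)) (cs dr locs : Option (List String)) : Bool :=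
  if pvStatusActive cs then
    pvHasKey s "conservation_status" &&
      (if (cs.getD []).contains (pvLookupD s "conservation_status") then pvPreD s dr locs else true)
  else pvPreD s dr locs

-- Pre_ excludes exactly the inputs on which A raises KeyError: some sighting is missing a key that
-- an active filter looks up on it (a lookup happens only if the sighting survived earlier filters).
def Pre_filter_sightings (sightings : List (List (String × String))) (conservation_statuses : Option (List String)) (date_range : Option (List String)) (locations : Option (List String)) : Prop :=
  sightings.all (fun s => pvPreS s conservation_statuses date_range locations) = true
instance (sightings : List (List (String × String))) (conservation_statuses : Option (List String)) (date_range : Option (List String)) (locations : Option (List String)) : Decidable (Pre_filter_sightings sightings conservation_statuses date_range locations) := by unfold Pre_filter_sightings; infer_instance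

def pvWitness_filter_sightings : (List (List (String × String))) × Option (List String) × Option (List String) × Option (List String) :=
  ([[("conservation_status", "LC"), ("date", "2020-05-01"), ("transect_name", "north")],
    [("conservation_status", "EN"), ("date", "2021-01-01"), ("transect_name", "south")]],
   some ["LC", "EN"], some ["2020-01-01", "2020-12-31"], some ["north"])

def Spec_filter_sightings (sightings : List (List (String × String))) (conservation_statuses : Option (List String)) (date_range : Option (List String)) (locations : Option (List String)) (out : List (List (String × String))) : Prop := out = filter_sightings_alt sightings conservation_statuses date_range locations
instance (sightings : List (List (String × String))) (conservation_statuses : Option (List String)) (date_range : Option (List String)) (locations : Option (List String)) (out : List (List (String × String))) : Decidable (Spec_filter_sightings sightings conservation_statuses date_range locations out) := by unfold Spec_filter_sightings; infer_instance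

-- ===== CLAIM (what is proved, stated in full; the proofs are below) =====
def Claim_equal_filter_sightings : Prop := ∀ (sightings : List (List (String × String))) (conservation_statuses : Option (List String)) (date_range : Option (List String)) (locations : Option (List String)), Dom_filter_sightings sightings conservation_statuses date_range locations → Pre_filter_sightings sightings conservation_statuses date_range locations → Spec_filter_sightings sightings conservation_statuses date_range locations (filter_sightings sightings conservation_statuses date_range locations)

-- ===== LEMMAS AND PROOFS =====
-- conditional filtering stage (proof-only helper)
def pvCondFilter {a : Type} (b : Bool) (p : a → Bool) (xs : List a) : List a :=
  if b then xs.filter p else xs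

-- three conditional stages collapse to one pass by the conjunction of the active tests
theorem pvChain_eq {a : Type} (b1 b2 b3 : Bool) (p q r : a → Bool) (xs : List a) :
    pvCondFilter b3 r (pvCondFilter b2 q (pvCondFilter b1 p xs)) =
      if !(b1 || b2 || b3) then xs
      else xs.filter (fun x => !(b1 && !(p x)) && (!(b2 && !(q x)) && !(b3 && !(r x)))) := by
  cases b1 <;> cases b2 <;> cases b3 <;>
    simp [pvCondFilter, List.filter_filter] <;>
    exact List.filter_congr (fun x _ => by cases p x <;> cases q x <;> cases r x <;> simp)

-- B's loop is (reversed accumulator) ++ one-pass filter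
theorem pvLoopB_eq (cs dr locs : List String) (bs bd bl : Bool)
    (acc xs : List (List (String × String))) :
    pvLoopB cs dr locs bs bd bl acc xs =
      acc.reverse ++ xs.filter (fun s =>
        !(bs && !(cs.contains (pvLookupD s "conservation_status"))) &&
        (!(bd && !(pvStrLe (dr.getD 0 "") (pvLookupD s "date") &&
                   pvStrLe (pvLookupD s "date") (dr.getD 1 ""))) &&
         !(bl && !(locs.contains (pvLookupD s "transect_name"))))) := by
  induction xs generalizing acc with
  | nil => simp [pvLoopB]
  | cons s rest ih =>
      simp only [pvLoopB]
      cases h1 : bs && !(cs.contains (pvLookupD s "conservation_status")) <;>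
      cases h2 : bd && !(pvStrLe (dr.getD 0 "") (pvLookupD s "date") &&
                         pvStrLe (pvLookupD s "date") (dr.getD 1 "")) <;>
      cases h3 : bl && !(locs.contains (pvLookupD s "transect_name")) <;>
        simp_all [List.filter_cons] <;> cases bs <;> cases bd <;> cases bl <;> simp_all <;>
        rcases h2 with h2 | h2 <;> simp_all

-- A is the three conditional stages
theorem pvA_eq (sightings : List (List (String × String)))
    (cs dr locs : Option (List String)) :
    filter_sightings sightings cs dr locs =
      pvCondFilter (pvLocActive locs)
        (fun s => (locs.getD []).contains (pvLookupD s "transect_name"))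
        (pvCondFilter (pvDateActive dr)
          (fun s => pvStrLe ((dr.getD []).getD 0 "") (pvLookupD s "date") &&
                    pvStrLe (pvLookupD s "date") ((dr.getD []).getD 1 ""))
          (pvCondFilter (pvStatusActive cs)
            (fun s => (cs.getD []).contains (pvLookupD s "conservation_status"))
            sightings)) := by
  rcases cs with _ | l1 <;> rcases dr with _ | l2 <;> rcases locs with _ | l3 <;> rfl

-- B is the collapsed form
theorem pvB_eq (sightings : List (List (String × String)))
    (cs dr locs : Option (List String)) :
    filter_sightings_alt sightings cs dr locs =
      if !(pvStatusActive cs || pvDateActive dr || pvLocActive locs) then sightings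
      else sightings.filter (fun s =>
        !(pvStatusActive cs && !((cs.getD []).contains (pvLookupD s "conservation_status"))) &&
        (!(pvDateActive dr && !(pvStrLe ((dr.getD []).getD 0 "") (pvLookupD s "date") &&
                                pvStrLe (pvLookupD s "date") ((dr.getD []).getD 1 ""))) &&
         !(pvLocActive locs && !((locs.getD []).contains (pvLookupD s "transect_name"))))) := by
  unfold filter_sightings_alt
  rcases cs with _ | l1 <;> rcases dr with _ | l2 <;> rcases locs with _ | l3 <;>
    simp only [pvLoopB_eq, List.reverse_nil, List.nil_append, pvStatusActive, pvDateActive,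
      pvLocActive, Option.getD_some, Option.getD_none]

theorem witness_ok : Dom_filter_sightings (pvWitness_filter_sightings.1) (pvWitness_filter_sightings.2.1) (pvWitness_filter_sightings.2.2.1) (pvWitness_filter_sightings.2.2.2) ∧ Pre_filter_sightings (pvWitness_filter_sightings.1) (pvWitness_filter_sightings.2.1) (pvWitness_filter_sightings.2.2.1) (pvWitness_filter_sightings.2.2.2) := by
  constructor <;> decide

-- ===== VERDICT (by name: the statement is the Claim_ definition above) =====
theorem filter_sightings_spec : Claim_equal_filter_sightings := by
  intro sightings cs dr locs _ _
  unfold Spec_filter_sightings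
  rw [pvA_eq, pvB_eq, pvChain_eq]
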